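-- pv_equiv track=rewrite | github.com/peter-as/advent-of-code | 2024/3.py | mult_indices_with_enabling
-- ===== SOURCE A (Python) =====
-- def mult_indices_with_enabling(s: str, enabled: bool = True) -> tuple[list[int], bool]:
--     """
--     Loops through the string, and if the next three characters are 'mul' it saves the current index
--     It it sees 'don't()' it will stop recognising 'mul' until there is a 'do()'
--
--     Args:
--         s: The string
--         enabled: Can 'mul' currently be recognised
--
--     Returns:
--         A tuple of the list of indices where 'mul' appears, and the current state of enabled
--     """
--     indices = []
--     for i in range(len(s)):
--         if s[i:min(i+3,len(s))] == "mul" and enabled: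
--             indices.append(i)
--         elif s[i:min(i+7,len(s))] == "don't()":
--             enabled = False
--         elif s[i:min(i+4,len(s))] == "do()":
--             enabled = True
--
--     return indices, enabled
-- ===== SOURCE B (Python) =====
-- import re
--
-- _TOKEN = re.compile(r"don't\(\)|do\(\)|mul")
--
-- def mult_indices_with_enabling(s: str, enabled: bool = True) -> tuple[list[int], bool]:
--     indices = []
--     for m in _TOKEN.finditer(s):
--         tok = m.group()
--         if tok == "mul":
--             if enabled:
--                 indices.append(m.start())
--         elif tok == "don't()":
--             enabled = False
--         else:
--             enabled = True
--     return indices, enabled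
-- ===== Notes on version B (the rewrite author's own statement) =====
-- stated objective: faster
-- what changed: B replaces the per-index fixed-length slice comparisons with a single regex tokenization (re.finditer over the alternation don't()|do()|mul) followed by one pass over the ordered token matches maintaining the enabled flag.
import Mathlib
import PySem

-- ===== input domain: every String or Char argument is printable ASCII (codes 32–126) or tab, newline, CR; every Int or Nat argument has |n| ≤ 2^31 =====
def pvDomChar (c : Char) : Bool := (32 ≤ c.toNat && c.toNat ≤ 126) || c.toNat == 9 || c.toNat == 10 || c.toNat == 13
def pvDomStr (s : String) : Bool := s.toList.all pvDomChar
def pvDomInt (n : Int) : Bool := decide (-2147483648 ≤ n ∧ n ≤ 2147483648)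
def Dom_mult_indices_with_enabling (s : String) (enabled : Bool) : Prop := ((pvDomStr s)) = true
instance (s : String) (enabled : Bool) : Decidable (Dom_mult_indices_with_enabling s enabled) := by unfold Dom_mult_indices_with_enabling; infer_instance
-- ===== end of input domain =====

-- B tokenizes the string once with a regex-style alternation (don't() | do() | mul) and then
-- runs a single pass over the ordered token list; A compares fixed-length slices at every index.

-- ===== PORT A =====
-- literal transliteration of A: for i in range(len(s)): compare s[i:min(i+k,len(s))] with each token
def mult_indices_with_enabling (s : String) (enabled : Bool) : List Int × Bool :=
  let cs := s.toList
  let n : Int := (cs.length : Int)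
  (PySem.List.pyRange 0 n 1).foldl (fun st i =>
    if PySem.List.slice cs (some i) (some (min (i + 3) n)) = "mul".toList ∧ st.2 = true then
      (st.1 ++ [i], st.2)
    else if PySem.List.slice cs (some i) (some (min (i + 7) n)) = "don't()".toList then
      (st.1, false)
    else if PySem.List.slice cs (some i) (some (min (i + 4) n)) = "do()".toList then
      (st.1, true)
    else st) ([], enabled)

-- ===== PORT B =====
-- hand-port of re.finditer(r"don't\(\)|do\(\)|mul", s): leftmost scan, alternatives tried in
-- order at each position, scanning resumes after a match.  Exact for these fixed literal
-- alternatives.  Token codes: 0 = "don't()", 1 = "do()", 2 = "mul".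
def tokensB (t : List Char) (i : Nat) : List (Nat × Nat) :=
  match t with
  | [] => []
  | c :: rest =>
    if "don't()".toList.isPrefixOf (c :: rest) then (i, 0) :: tokensB (rest.drop 6) (i + 7)
    else if "do()".toList.isPrefixOf (c :: rest) then (i, 1) :: tokensB (rest.drop 3) (i + 4)
    else if "mul".toList.isPrefixOf (c :: rest) then (i, 2) :: tokensB (rest.drop 2) (i + 3)
    else tokensB rest (i + 1)
termination_by t.length
decreasing_by all_goals simp

-- the single pass of Source B over the match list
def runB (ts : List (Nat × Nat)) (acc : List Int) (en : Bool) : List Int × Bool :=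
  match ts with
  | [] => (acc, en)
  | (i, t) :: rest =>
    if t = 2 then runB rest (if en then acc ++ [(i : Int)] else acc) en
    else if t = 0 then runB rest acc false
    else runB rest acc true

def mult_indices_with_enabling_alt (s : String) (enabled : Bool) : List Int × Bool :=
  runB (tokensB s.toList 0) [] enabled

-- ===== PRECONDITION & SPEC =====
def Spec_mult_indices_with_enabling (s : String) (enabled : Bool) (out : List Int × Bool) : Prop := out = mult_indices_with_enabling_alt s enabled
instance (s : String) (enabled : Bool) (out : List Int × Bool) : Decidable (Spec_mult_indices_with_enabling s enabled out) := by unfold Spec_mult_indices_with_enabling; infer_instance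

-- ===== CLAIM (what is proved, stated in full; the proofs are below) =====
def Claim_equal_mult_indices_with_enabling : Prop := ∀ (s : String) (enabled : Bool), Dom_mult_indices_with_enabling s enabled → Spec_mult_indices_with_enabling s enabled (mult_indices_with_enabling s enabled)

-- ===== LEMMAS AND PROOFS =====

-- A's loop rephrased as a recursion over the current suffix (proof helper only)
def stepA (t : List Char) (i : Nat) (acc : List Int) (en : Bool) : List Int × Bool :=
  match t with
  | [] => (acc, en)
  | c :: rest =>
    if "mul".toList <+: (c :: rest) ∧ en = true then stepA rest (i + 1) (acc ++ [(i : Int)]) en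
    else if "don't()".toList <+: (c :: rest) then stepA rest (i + 1) acc false
    else if "do()".toList <+: (c :: rest) then stepA rest (i + 1) acc true
    else stepA rest (i + 1) acc en

-- evaluation lemmas for stepA on each token and on a token-free position
lemma stepA_dont (r2 : List Char) (i : Nat) (acc : List Int) (en : Bool) :
    stepA ('d'::'o'::'n'::'\''::'t'::'('::')'::r2) i acc en = stepA r2 (i + 7) acc false := by
  simp [stepA, List.cons_prefix_cons]

lemma stepA_do (r2 : List Char) (i : Nat) (acc : List Int) (en : Bool) :
    stepA ('d'::'o'::'('::')'::r2) i acc en = stepA r2 (i + 4) acc true := by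
  simp [stepA, List.cons_prefix_cons]

lemma stepA_mul (r2 : List Char) (i : Nat) (acc : List Int) (en : Bool) :
    stepA ('m'::'u'::'l'::r2) i acc en
      = stepA r2 (i + 3) (if en then acc ++ [(i : Int)] else acc) en := by
  cases en <;> simp [stepA, List.cons_prefix_cons]

lemma stepA_skip (c : Char) (rest : List Char) (i : Nat) (acc : List Int) (en : Bool)
    (h0 : ¬ "don't()".toList <+: (c :: rest)) (h1 : ¬ "do()".toList <+: (c :: rest))
    (h2 : ¬ "mul".toList <+: (c :: rest)) :
    stepA (c :: rest) i acc en = stepA rest (i + 1) acc en := by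
  rw [stepA, if_neg (fun h => h2 h.1), if_neg h0, if_neg h1]

-- evaluation lemmas for tokensB on each token and on a token-free position
lemma tokensB_dont (r2 : List Char) (i : Nat) :
    tokensB ('d'::'o'::'n'::'\''::'t'::'('::')'::r2) i = (i, 0) :: tokensB r2 (i + 7) := by
  rw [tokensB]; simp [List.isPrefixOf]

lemma tokensB_do (r2 : List Char) (i : Nat) :
    tokensB ('d'::'o'::'('::')'::r2) i = (i, 1) :: tokensB r2 (i + 4) := by
  rw [tokensB]; simp [List.isPrefixOf]

lemma tokensB_mul (r2 : List Char) (i : Nat) :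
    tokensB ('m'::'u'::'l'::r2) i = (i, 2) :: tokensB r2 (i + 3) := by
  rw [tokensB]; simp [List.isPrefixOf]

lemma tokensB_skip (c : Char) (rest : List Char) (i : Nat)
    (h0 : ¬ "don't()".toList <+: (c :: rest)) (h1 : ¬ "do()".toList <+: (c :: rest))
    (h2 : ¬ "mul".toList <+: (c :: rest)) :
    tokensB (c :: rest) i = tokensB rest (i + 1) := by
  rw [tokensB]
  rw [if_neg (by simpa [List.isPrefixOf_iff_prefix] using h0),
      if_neg (by simpa [List.isPrefixOf_iff_prefix] using h1),
      if_neg (by simpa [List.isPrefixOf_iff_prefix] using h2)]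

-- the suffix recursion equals B's tokenize-then-run pass
lemma stepA_eq_runB (n : Nat) : ∀ (t : List Char), t.length ≤ n → ∀ (i : Nat) (acc : List Int) (en : Bool),
    stepA t i acc en = runB (tokensB t i) acc en := by
  induction n with
  | zero =>
    intro t ht i acc en
    have : t = [] := List.length_eq_zero_iff.mp (Nat.le_zero.mp ht)
    subst this; rw [stepA, tokensB, runB]
  | succ n ih =>
    intro t ht i acc en
    match t with
    | [] => rw [stepA, tokensB, runB]
    | c :: rest =>
      by_cases h0 : "don't()".toList <+: (c :: rest)
      · obtain ⟨r2, hr⟩ := h0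
        have he : c :: rest = 'd'::'o'::'n'::'\''::'t'::'('::')'::r2 := by rw [← hr]; rfl
        rw [he] at ht
        simp only [List.length_cons] at ht
        rw [he, stepA_dont, tokensB_dont, runB]
        norm_num
        rw [ih r2 (by omega)]
      · by_cases h1 : "do()".toList <+: (c :: rest)
        · obtain ⟨r2, hr⟩ := h1
          have he : c :: rest = 'd'::'o'::'('::')'::r2 := by rw [← hr]; rfl
          rw [he] at ht
          simp only [List.length_cons] at ht
          rw [he, stepA_do, tokensB_do, runB]
          norm_num
          rw [ih r2 (by omega)]
        · by_cases h2 : "mul".toList <+: (c :: rest)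
          · obtain ⟨r2, hr⟩ := h2
            have he : c :: rest = 'm'::'u'::'l'::r2 := by rw [← hr]; rfl
            rw [he] at ht
            simp only [List.length_cons] at ht
            rw [he, stepA_mul, tokensB_mul, runB]
            norm_num
            rw [ih r2 (by omega)]
          · rw [stepA_skip c rest i acc en h0 h1 h2, tokensB_skip c rest i h0 h1 h2]
            exact ih rest (by simpa using Nat.le_of_succ_le_succ ht) (i + 1) acc en

-- slice with A's clamped stop index is a plain take on the suffix
lemma slice_take (cs : List Char) (k m : Nat) :
    PySem.List.slice cs (some (k : Int)) (some (min ((k : Int) + (m : Int)) ((cs.length : Int)))) =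
      (cs.drop k).take m := by
  have h1 : min ((k : Int) + (m : Int)) ((cs.length : Int)) = ((min (k + m) cs.length : Nat) : Int) := by
    push_cast; omega
  rw [h1, PySem.List.slice_natCast]
  rw [List.take_eq_take_iff]
  simp; omega

-- comparing a take with a token of that length is a prefix test
lemma take_eq_iff_prefix (l p : List Char) (m : Nat) (hp : p.length = m) :
    (l.take m = p) ↔ p <+: l := by
  constructor
  · intro h; rw [List.prefix_iff_eq_take, hp, h]
  · intro h; rw [List.prefix_iff_eq_take, hp] at h; exact h.symm

-- A's foldl over range(len) equals the suffix recursion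
lemma foldA (cs : List Char) : ∀ (m k : Nat) (acc : List Int) (en : Bool), cs.length = k + m →
    (PySem.List.pyRange (k : Int) ((cs.length : Int)) 1).foldl (fun st i =>
      if PySem.List.slice cs (some i) (some (min (i + 3) ((cs.length : Int)))) = "mul".toList ∧ st.2 = true then
        (st.1 ++ [i], st.2)
      else if PySem.List.slice cs (some i) (some (min (i + 7) ((cs.length : Int)))) = "don't()".toList then
        (st.1, false)
      else if PySem.List.slice cs (some i) (some (min (i + 4) ((cs.length : Int)))) = "do()".toList then
        (st.1, true)
      else st) (acc, en) = stepA (cs.drop k) k acc en := by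
  intro m
  induction m with
  | zero =>
    intro k acc en hk
    rw [PySem.List.pyRange_one_eq_nil (by exact_mod_cast Nat.le_of_eq (by omega))]
    rw [List.drop_eq_nil_of_le (by omega)]
    rw [List.foldl_nil, stepA]
  | succ m ih =>
    intro k acc en hk
    have hklt : k < cs.length := by omega
    rw [PySem.List.pyRange_one_cons (by exact_mod_cast hklt)]
    rw [List.foldl_cons]
    have e3 : PySem.List.slice cs (some (k : Int)) (some (min ((k : Int) + 3) ((cs.length : Int)))) = "mul".toList
          ↔ "mul".toList <+: cs.drop k := by
      rw [show ((k : Int) + 3) = ((k : Int) + ((3 : Nat) : Int)) by norm_num, slice_take,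
        take_eq_iff_prefix _ _ 3 rfl]
    have e7 : PySem.List.slice cs (some (k : Int)) (some (min ((k : Int) + 7) ((cs.length : Int)))) = "don't()".toList
          ↔ "don't()".toList <+: cs.drop k := by
      rw [show ((k : Int) + 7) = ((k : Int) + ((7 : Nat) : Int)) by norm_num, slice_take,
        take_eq_iff_prefix _ _ 7 rfl]
    have e4 : PySem.List.slice cs (some (k : Int)) (some (min ((k : Int) + 4) ((cs.length : Int)))) = "do()".toList
          ↔ "do()".toList <+: cs.drop k := by
      rw [show ((k : Int) + 4) = ((k : Int) + ((4 : Nat) : Int)) by norm_num, slice_take,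
        take_eq_iff_prefix _ _ 4 rfl]
    have hd : cs.drop k = cs[k] :: cs.drop (k + 1) := by
      rw [List.drop_eq_getElem_cons hklt]
    have hcast : ((k : Int) + 1) = ((k + 1 : Nat) : Int) := by push_cast; ring
    rw [hd, stepA]
    simp only [e3, e7, e4, hd]
    split_ifs with p1 p2 p3
    · rw [hcast, ih (k + 1) (acc ++ [(k : Int)]) en (by omega)]
    · rw [hcast, ih (k + 1) acc false (by omega)]
    · rw [hcast, ih (k + 1) acc true (by omega)]
    · rw [hcast, ih (k + 1) acc en (by omega)]

-- ===== VERDICT (by name: the statement is the Claim_ definition above) =====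
theorem mult_indices_with_enabling_spec : Claim_equal_mult_indices_with_enabling := by
  intro s enabled _
  unfold Spec_mult_indices_with_enabling
  simp only [mult_indices_with_enabling, mult_indices_with_enabling_alt]
  rw [← stepA_eq_runB s.toList.length s.toList (le_refl _) 0 [] enabled]
  have h := foldA s.toList s.toList.length 0 [] enabled (by omega)
  simpa using h
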